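-- pv_equiv track=rewrite | github.com/stefanrzv2000/AI_Homeworks | Lab4/map_col.py | arc_cons
-- ===== SOURCE A (Python) =====
-- def arc_reduce(c1, c2, colors):
--
--     change = False
--     for i in list(colors[c1]):
--         found = False
--         for j in list(colors[c2]):
--             if i!=j:
--                 found = True
--                 break
--         if not found:
--             colors[c1].remove(i)
--             change = True
--
--     return change
--
-- def arc_cons(countries,colors,neighbours):
--
--     queue = []
--     index = 0
--     for x in countries:
--         for y in countries:
--             if x==y: continue
--             if (x,y) in queue: continue
--             if x in neighbours[y] or y in neighbours[x]: queue.append((x,y))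
--
--     while index < len(queue):
--         x,y = queue[index]
--         index += 1
--
--         if arc_reduce(x,y,colors):
--             if len(colors[x]) == 0:
--                 return None
--             else:
--                 queue += [(x,z) for z in neighbours[x] if z!=x and z!=y]
--
--     return colors
-- ===== SOURCE B (Python) =====
-- def revise(x, y, colors):
--     # closed form of A's nested scans: nothing can be removed unless colors[y]
--     # holds at most one distinct value; the doomed elements of colors[x] are
--     # computed in one comprehension, then removed in place (as A does)
--     dy = list(colors[y])
--     if len(set(dy)) > 1:
--         return False
--     doomed = list(colors[x]) if not dy else [c for c in colors[x] if c == dy[0]]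
--     if not doomed:
--         return False
--     for c in doomed:
--         colors[x].remove(c)
--     return True
--
-- def arc_cons(countries, colors, neighbours):
--     uniq = list(dict.fromkeys(countries))
--     pending = [(x, y) for x in uniq for y in uniq
--                if x != y and (x in neighbours[y] or y in neighbours[x])]
--     while pending:
--         x, y = pending.pop(0)
--         if revise(x, y, colors):
--             if not colors[x]:
--                 return None
--             pending += [(x, z) for z in neighbours[x] if z != x and z != y]
--     return colors
-- ===== Notes on version B (the rewrite author's own statement) =====
-- stated objective: faster
-- what changed: revise replaces A's arc_reduce nested scans (per-element inner loop with found/break) by a closed form: it bails out when colors[y] has two distinct values, computes the doomed elements of colors[x] in one comprehension and removes them in place; the queue is built by deduplicating countries first and one comprehension, removing A's '(x,y) in queue' linear membership scan per ordered pair; the worklist is consumed from the front (pop(0)) instead of being walked by an index.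
import Mathlib
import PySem

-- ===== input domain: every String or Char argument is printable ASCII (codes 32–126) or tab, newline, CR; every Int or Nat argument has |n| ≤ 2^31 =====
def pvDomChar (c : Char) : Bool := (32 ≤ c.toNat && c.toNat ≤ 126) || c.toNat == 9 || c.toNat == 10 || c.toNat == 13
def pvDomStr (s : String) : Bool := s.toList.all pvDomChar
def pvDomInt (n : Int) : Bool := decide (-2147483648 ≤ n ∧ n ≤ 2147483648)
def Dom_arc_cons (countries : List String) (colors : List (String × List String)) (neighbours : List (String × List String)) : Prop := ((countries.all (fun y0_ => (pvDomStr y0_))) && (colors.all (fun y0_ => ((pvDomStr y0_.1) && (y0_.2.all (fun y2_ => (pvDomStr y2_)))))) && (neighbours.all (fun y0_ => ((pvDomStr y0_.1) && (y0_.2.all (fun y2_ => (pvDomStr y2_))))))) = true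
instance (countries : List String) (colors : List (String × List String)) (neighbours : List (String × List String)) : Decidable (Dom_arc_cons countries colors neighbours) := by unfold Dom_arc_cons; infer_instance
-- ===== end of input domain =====

-- B replaces A's arc_reduce (nested per-element scans with repeated list.remove) by a closed-form
-- revise (bail out when colors[y] has two distinct values, else filter that value out of colors[x]
-- in one pass), builds the queue by deduplicating countries first (dropping A's per-pair
-- '(x,y) in queue' scan), and consumes the worklist from the front instead of walking an index.
-- Both A and B mutate the colors argument in place (element removal only); the equivalence
-- proved here is about the RETURN value.

-- ===== PORT A =====
abbrev SDict := PySem.Dict String (List String)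

/-- sum of the lengths of all stored colour lists (termination measure for both loops) -/
def totalSize (d : SDict) : Nat := (d.items.map (fun p => p.2.length)).sum

/-- `arc_reduce(c1, c2, colors)`: literal port of A's double loop with in-place `remove`.
`getD … []` stands for `colors[c1]` / `colors[c2]` (KeyError excluded by `Pre_`); the
`none` arm of `remove?` is unreachable (Python's `list.remove` always succeeds here). -/
def arc_reduce (c1 c2 : String) (colors : SDict) : Bool × SDict :=
  (colors.getD c1 []).foldl
    (fun st i =>
      let found := (st.2.getD c2 []).any (fun j => i != j)
      if !found then
        match PySem.List.remove? (st.2.getD c1 []) i with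
        | some l => (true, st.2.insert c1 l)
        | none => st
      else st)
    (false, colors)

-- the facts the loops' termination / nodup threading cites (proved here because the ports use them)
theorem totalSize_insert_lt (d : SDict) (k : String) (l : List String)
    (hnd : d.keys.Nodup) (hc : d.contains k = true)
    (hlt : l.length < (d.getD k []).length) :
    totalSize (d.insert k l) < totalSize d := by
  have hv : d.get? k = some (d.getD k []) := by
    rw [PySem.Dict.contains_eq_isSome_get?] at hc
    cases hg : d.get? k with
    | none => rw [hg] at hc; simp at hc
    | some v => rw [PySem.Dict.getD_of_get?_eq_some (h := hg)]
  have hmem : (k, d.getD k []) ∈ d.items := PySem.Dict.mem_items_of_get?_eq_some _ hv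
  obtain ⟨s, t, hst⟩ := List.append_of_mem hmem
  have hks : ∀ p ∈ s, p.1 ≠ k := by
    intro p hp hpk
    have : ¬ (d.items.map Prod.fst).Nodup := by
      rw [hst]
      simp only [List.map_append, List.map_cons, List.nodup_append]
      intro h
      have h1 := h.2.2
      have := h1 (p.1) (by exact List.mem_map_of_mem hp)
      simp [hpk] at this
    exact this (by simpa [PySem.Dict.keys] using hnd)
  have hkt : ∀ p ∈ t, p.1 ≠ k := by
    intro p hp hpk
    have : ¬ (d.items.map Prod.fst).Nodup := by
      rw [hst]
      simp only [List.map_append, List.map_cons, List.nodup_append]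
      intro h
      have h1 := h.2.1
      rw [List.nodup_cons] at h1
      exact h1.1 (hpk ▸ List.mem_map_of_mem hp)
    exact this (by simpa [PySem.Dict.keys] using hnd)
  have hins := PySem.Dict.items_insert_of_contains d l hc
  unfold totalSize
  rw [hins, hst]
  simp only [List.map_append, List.map_cons, List.sum_append, List.sum_cons]
  have hs : List.map (fun p => if (p.1 == k) = true then (k, l) else p) s = List.map id s :=
    List.map_congr_left (fun p hp => by simp [hks p hp])
  have ht : List.map (fun p => if (p.1 == k) = true then (k, l) else p) t = List.map id t :=
    List.map_congr_left (fun p hp => by simp [hkt p hp])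
  rw [hs, ht]
  simp only [List.map_id, BEq.rfl, if_true]
  omega

theorem arc_reduce_props (c1 c2 : String) (colors : SDict) (hnd : colors.keys.Nodup) :
    (arc_reduce c1 c2 colors).2.keys.Nodup ∧
    ((arc_reduce c1 c2 colors).1 = false → (arc_reduce c1 c2 colors).2 = colors) ∧
    ((arc_reduce c1 c2 colors).1 = true → totalSize (arc_reduce c1 c2 colors).2 < totalSize colors) := by
  unfold arc_reduce
  refine List.foldlRecOn (motive := fun (st : Bool × SDict) =>
      st.2.keys.Nodup ∧ (st.1 = false → st.2 = colors) ∧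
      (st.1 = true → totalSize st.2 < totalSize colors)) _ _ ?_ ?_
  · exact ⟨hnd, fun _ => rfl, fun h => by simp at h⟩
  · rintro ⟨b, d⟩ ⟨ih1, ih2, ih3⟩ i _
    dsimp only
    split
    · -- !found = true branch
      simp only at ih1 ih2 ih3
      cases hrem : PySem.List.remove? (PySem.Dict.getD d c1 []) i with
      | none => exact ⟨ih1, ih2, ih3⟩
      | some l =>
        refine ⟨by simpa using PySem.Dict.nodup_keys_insert (d := d) (k := c1) (v := l) ih1,
          fun h => by simp at h, fun _ => ?_⟩
        simp only
        have hmemi : i ∈ PySem.Dict.getD d c1 [] := by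
          by_contra hni
          rw [(PySem.List.remove?_eq_none_iff _ _).2 hni] at hrem
          simp at hrem
        have hlen : l.length < (PySem.Dict.getD d c1 []).length := by
          have h0 := PySem.List.remove?_eq_some_erase _ _ hmemi
          rw [h0] at hrem
          have hl := Option.some.inj hrem
          rw [← hl, List.length_erase_of_mem hmemi]
          have : 0 < (PySem.Dict.getD d c1 []).length := List.length_pos_of_mem hmemi
          omega
        have hcont : d.contains c1 = true := by
          by_contra hnc
          rw [PySem.Dict.getD_of_not_contains (h := by simpa using hnc)] at hmemi
          exact (List.not_mem_nil).elim hmemi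
        have hins := totalSize_insert_lt d c1 l ih1 hcont hlen
        cases b with
        | false => rw [ih2 rfl] at hins; rw [ih2 rfl]; exact hins
        | true => exact lt_trans hins (ih3 rfl)
    · exact ⟨ih1, ih2, ih3⟩

/-- A's `while index < len(queue)` worklist; `hnd` threads the dict invariant used for termination. -/
def loopA (nb : SDict) (queue : List (String × String)) (index : Nat) (colors : SDict)
    (hnd : colors.keys.Nodup) : Option SDict :=
  if h : index < queue.length then
    let p := queue[index]
    let r := arc_reduce p.1 p.2 colors
    if hr : r.1 = true then
      if (r.2.getD p.1 []).length = 0 then none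
      else loopA nb
        (queue ++ ((nb.getD p.1 []).filter (fun z => z != p.1 && z != p.2)).map (fun z => (p.1, z)))
        (index + 1) r.2 ((arc_reduce_props p.1 p.2 colors hnd).1)
    else loopA nb queue (index + 1) r.2 ((arc_reduce_props p.1 p.2 colors hnd).1)
  else some colors
termination_by (totalSize colors, queue.length - index)
decreasing_by
  · exact Prod.Lex.left _ _ ((arc_reduce_props _ _ colors hnd).2.2 hr)
  · have h2 : (arc_reduce queue[index].1 queue[index].2 colors).2 = colors :=
      (arc_reduce_props _ _ colors hnd).2.1 (by simpa using hr)
    rw [h2]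
    exact Prod.Lex.right _ (by omega)

def arc_cons (countries : List String) (colors : List (String × List String)) (neighbours : List (String × List String)) : Option (List (String × List String)) :=
  let colorsD : SDict := PySem.Dict.ofList colors
  let nbD : SDict := PySem.Dict.ofList neighbours
  let queue := countries.foldl (fun q x =>
    countries.foldl (fun q y =>
      if x = y then q
      else if (x, y) ∈ q then q
      else if (nbD.getD y []).contains x || (nbD.getD x []).contains y then q ++ [(x, y)]
      else q) q) ([] : List (String × String))
  (loopA nbD queue 0 colorsD (PySem.Dict.nodup_keys_ofList colors)).map PySem.Dict.items

-- ===== PORT B =====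

/-- B's `revise(x, y, colors)`: closed form — no removal is possible unless `colors[y]`
holds at most one distinct value; the doomed elements of `colors[x]` are computed in one
comprehension and then removed in place (`for c in doomed: colors[x].remove(c)`). -/
def removeAll (l doomed : List String) : List String :=
  doomed.foldl (fun acc c => (PySem.List.remove? acc c).getD acc) l

def revise (x y : String) (colors : SDict) : Bool × SDict :=
  let dy := colors.getD y []
  if 1 < (PySem.Set.ofList dy).length then (false, colors)
  else
    let doomed : List String := match dy with
      | [] => colors.getD x []
      | v :: _ => (colors.getD x []).filter (fun c => c == v)
    if doomed.isEmpty then (false, colors)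
    else (true, colors.insert x (removeAll (colors.getD x []) doomed))

-- the removal loop never touches an element in front of a survivor …
theorem foldl_remove_cons_ne (ds : List String) (a : String) (l : List String)
    (h : ∀ c ∈ ds, c ≠ a) :
    ds.foldl (fun acc c => (PySem.List.remove? acc c).getD acc) (a :: l)
      = a :: ds.foldl (fun acc c => (PySem.List.remove? acc c).getD acc) l := by
  induction ds generalizing l with
  | nil => rfl
  | cons c t ih =>
    rw [List.foldl_cons, List.foldl_cons]
    have hca : a ≠ c := fun e => h c List.mem_cons_self e.symm
    have hstep : (PySem.List.remove? (a :: l) c).getD (a :: l)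
        = a :: (PySem.List.remove? l c).getD l := by
      rw [PySem.List.remove?_cons_of_ne l hca]
      cases PySem.List.remove? l c <;> rfl
    rw [hstep]
    exact ih _ (fun d hd => h d (List.mem_cons_of_mem _ hd))

-- … so removing, in order, the elements of `l.filter p` from `l` leaves `l.filter (!p ·)`
theorem removeAll_filter (p : String → Bool) (l : List String) :
    removeAll l (l.filter p) = l.filter (fun c => !p c) := by
  unfold removeAll
  induction l with
  | nil => rfl
  | cons a t ih =>
    cases h : p a with
    | false =>
      have hf : (a :: t).filter p = t.filter p := by simp [h]
      have hne : ∀ c ∈ t.filter p, c ≠ a := by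
        intro c hc e
        rw [List.mem_filter] at hc
        rw [e, h] at hc
        exact Bool.noConfusion hc.2
      rw [hf, foldl_remove_cons_ne _ _ _ hne, ih]
      simp [h]
    | true =>
      have hf : (a :: t).filter p = a :: t.filter p := by simp [h]
      have hstep : (PySem.List.remove? (a :: t) a).getD (a :: t) = t := by
        rw [PySem.List.remove?_cons_self]; rfl
      rw [hf, List.foldl_cons, hstep, ih]
      simp [h]

theorem removeAll_self (l : List String) : removeAll l l = [] := by
  have h := removeAll_filter (fun _ => true) l
  simpa using h

-- the two facts loopB's termination cites
theorem revise_props (x y : String) (colors : SDict) (hnd : colors.keys.Nodup) :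
    (revise x y colors).2.keys.Nodup ∧
    ((revise x y colors).1 = true → totalSize (revise x y colors).2 < totalSize colors) := by
  unfold revise
  dsimp only
  by_cases h1 : 1 < (PySem.Set.ofList (colors.getD y [])).length
  · rw [if_pos h1]; exact ⟨hnd, fun h => by simp at h⟩
  · rw [if_neg h1]
    have finish : ∀ (nw : List String), nw.length < (colors.getD x []).length →
        ((colors.insert x nw).keys.Nodup ∧
         (true = true → totalSize (colors.insert x nw) < totalSize colors)) := by
      intro nw hlt
      have hcont : colors.contains x = true := by
        by_contra hnc
        rw [PySem.Dict.getD_of_not_contains (h := by simpa using hnc)] at hlt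
        simp at hlt
      exact ⟨by simpa using PySem.Dict.nodup_keys_insert (d := colors) (k := x) (v := nw) hnd,
        fun _ => totalSize_insert_lt colors x nw hnd hcont hlt⟩
    cases hdy : colors.getD y [] with
    | nil =>
      dsimp only
      by_cases he : (colors.getD x []).isEmpty
      · rw [if_pos he]; exact ⟨hnd, fun h => by simp at h⟩
      · rw [if_neg he]
        refine finish _ ?_
        rw [removeAll_self]
        have hne0 : colors.getD x [] ≠ [] := by simpa [List.isEmpty_iff] using he
        simpa using List.length_pos_of_ne_nil hne0
    | cons v t =>
      dsimp only
      by_cases he : ((colors.getD x []).filter (fun c => c == v)).isEmpty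
      · rw [if_pos he]; exact ⟨hnd, fun h => by simp at h⟩
      · rw [if_neg he]
        refine finish _ ?_
        rw [removeAll_filter (fun c => c == v) (colors.getD x [])]
        have hex : ∃ a ∈ colors.getD x [], (a == v) = true := by
          have hne' : (colors.getD x []).filter (fun c => c == v) ≠ [] := by
            simpa [List.isEmpty_iff] using he
          obtain ⟨a, ha⟩ := List.exists_mem_of_ne_nil _ hne'
          rw [List.mem_filter] at ha
          exact ⟨a, ha.1, ha.2⟩
        obtain ⟨a, ha, hav⟩ := hex
        have hle := List.length_filter_le (fun c => !(c == v)) (colors.getD x [])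
        have hnefl : (colors.getD x []).filter (fun c => !(c == v)) ≠ colors.getD x [] := by
          intro hfe
          have := List.filter_eq_self.mp hfe a ha
          rw [hav] at this
          exact Bool.noConfusion this
        have : ((colors.getD x []).filter (fun c => !(c == v))).length
            ≠ (colors.getD x []).length := by
          intro hl
          exact hnefl (List.filter_eq_self.mpr (List.length_filter_eq_length_iff.mp hl))
        omega

/-- `[(x, z) for z in neighbours[x] if z != x and z != y]` as one filterMap. -/
def newArcs (nb : SDict) (x y : String) : List (String × String) :=
  (nb.getD x []).filterMap (fun z => if z != x && z != y then some (x, z) else none)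

/-- B's `while pending: x, y = pending.pop(0)` loop, consuming the list from the front. -/
def loopB (nb : SDict) (pending : List (String × String)) (colors : SDict)
    (hnd : colors.keys.Nodup) : Option SDict :=
  match pending with
  | [] => some colors
  | p :: rest =>
    if _hr : (revise p.1 p.2 colors).1 = true then
      if (revise p.1 p.2 colors).2.getD p.1 [] = [] then none
      else loopB nb (rest ++ newArcs nb p.1 p.2) (revise p.1 p.2 colors).2
        ((revise_props p.1 p.2 colors hnd).1)
    else loopB nb rest colors hnd
termination_by (totalSize colors, pending.length)
decreasing_by
  · exact Prod.Lex.left _ _ ((revise_props p.1 p.2 colors hnd).2 _hr)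
  · exact Prod.Lex.right _ (by simp)

def arc_cons_alt (countries : List String) (colors : List (String × List String)) (neighbours : List (String × List String)) : Option (List (String × List String)) :=
  let colorsD : SDict := PySem.Dict.ofList colors
  let nbD : SDict := PySem.Dict.ofList neighbours
  let uniq := PySem.Set.ofList countries
  let pending := uniq.flatMap (fun x => uniq.filterMap (fun y =>
    if x != y && ((nbD.getD y []).contains x || (nbD.getD x []).contains y) then some (x, y)
    else none))
  (loopB nbD pending colorsD (PySem.Dict.nodup_keys_ofList colors)).map PySem.Dict.items

-- ===== PRECONDITION & SPEC =====
-- Pre_ excludes exactly the KeyError inputs: with ≥ 2 distinct countries, every country needs a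
-- `neighbours` entry, and every country adjacent to another one needs a `colors` entry, as does
-- every member of its neighbour list.  This is slightly conservative: A can return early (None, or
-- no arc ever fires) before touching a missing `colors` key — see the cites in claim.json.
def Pre_arc_cons (countries : List String) (colors : List (String × List String)) (neighbours : List (String × List String)) : Prop :=
  let nbD : SDict := PySem.Dict.ofList neighbours
  let colorsD : SDict := PySem.Dict.ofList colors
  let U := PySem.List.dedup countries
  U.length ≤ 1 ∨
    ((∀ x ∈ U, nbD.contains x = true) ∧
     (∀ x ∈ U,
       (∃ y ∈ U, y ≠ x ∧ ((nbD.getD y []).contains x = true ∨ (nbD.getD x []).contains y = true)) →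
       colorsD.contains x = true ∧ ∀ z ∈ nbD.getD x [], colorsD.contains z = true))
instance (countries : List String) (colors : List (String × List String)) (neighbours : List (String × List String)) : Decidable (Pre_arc_cons countries colors neighbours) := by unfold Pre_arc_cons; infer_instance

def pvWitness_arc_cons : List String × (List (String × List String)) × (List (String × List String)) :=
  (["a", "b"], [("a", ["1", "2"]), ("b", ["1"])], [("a", ["b"]), ("b", ["a"])])

def Spec_arc_cons (countries : List String) (colors : List (String × List String)) (neighbours : List (String × List String)) (out : Option (List (String × List String))) : Prop := out = arc_cons_alt countries colors neighbours
instance (countries : List String) (colors : List (String × List String)) (neighbours : List (String × List String)) (out : Option (List (String × List String))) : Decidable (Spec_arc_cons countries colors neighbours out) := by unfold Spec_arc_cons; infer_instance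

-- ===== CLAIM (what is proved, stated in full; the proofs are below) =====
def Claim_equal_arc_cons : Prop := ∀ (countries : List String) (colors : List (String × List String)) (neighbours : List (String × List String)), Dom_arc_cons countries colors neighbours → Pre_arc_cons countries colors neighbours → Spec_arc_cons countries colors neighbours (arc_cons countries colors neighbours)

-- ===== LEMMAS AND PROOFS =====

-- the proofs actually establish the port equality unconditionally (Pre_'s role is to keep the
-- Python originals crash-free; the ports are total via the getD/remove?/filter guards)

-- ---- arc_reduce ↔ revise ----

def keepB (d2 : List String) (i : String) : Bool := d2.any (fun j => i != j)

def stepA (c1 c2 : String) : Bool × SDict → String → Bool × SDict :=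
  fun st i =>
    let found := (st.2.getD c2 []).any (fun j => i != j)
    if !found then
      match PySem.List.remove? (st.2.getD c1 []) i with
      | some l => (true, st.2.insert c1 l)
      | none => st
    else st

theorem arc_reduce_eq_foldl (c1 c2 : String) (colors : SDict) :
    arc_reduce c1 c2 colors = (colors.getD c1 []).foldl (stepA c1 c2) (false, colors) := rfl

theorem remove?_append_not_mem (pre s' : List String) (i : String) (h : i ∉ pre) :
    PySem.List.remove? (pre ++ i :: s') i = some (pre ++ s') := by
  induction pre with
  | nil => simp
  | cons a t ih =>
    have ha : a ≠ i := fun e => h (by simp [e])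
    have ht : i ∉ t := fun e => h (by simp [e])
    rw [List.cons_append, PySem.List.remove?_cons_of_ne (t ++ i :: s') ha, ih ht]
    rfl

theorem insert_getD_self (d : SDict) (k : String) (hnd : d.keys.Nodup) (hc : d.contains k = true) :
    d.insert k (d.getD k []) = d := by
  apply PySem.Dict.ext
  rw [PySem.Dict.items_insert_of_contains d _ hc]
  conv_rhs => rw [← List.map_id d.items]
  apply List.map_congr_left
  intro p hp
  by_cases hpk : p.1 = k
  · have hg : d.get? p.1 = some p.2 := PySem.Dict.get?_of_mem_items _ (by simpa using hp) hnd
    have h2 : d.getD k [] = p.2 := by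
      rw [← hpk]; exact PySem.Dict.getD_of_get?_eq_some d [] hg
    simp only [hpk, BEq.rfl, h2, id, if_true]
    rw [← hpk]
  · simp [hpk]

theorem foldA_char (c1 c2 : String) (hne : c2 ≠ c1) (d : SDict) :
    ∀ (s pre : List String) (b0 : Bool),
      (∀ i ∈ pre, keepB (d.getD c2 []) i = true) →
      s.foldl (stepA c1 c2) (b0, d.insert c1 (pre ++ s)) =
        (b0 || s.any (fun i => !keepB (d.getD c2 []) i),
         d.insert c1 (pre ++ s.filter (keepB (d.getD c2 [])))) := by
  intro s
  induction s with
  | nil => intro pre b0 _; simp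
  | cons i t ih =>
    intro pre b0 hpre
    rw [List.foldl_cons]
    have hget2 : (d.insert c1 (pre ++ i :: t)).getD c2 [] = d.getD c2 [] :=
      PySem.Dict.getD_insert_of_ne d _ _ hne
    have hget1 : (d.insert c1 (pre ++ i :: t)).getD c1 [] = pre ++ i :: t :=
      PySem.Dict.getD_insert_self d c1 (pre ++ i :: t) []
    by_cases hk : keepB (d.getD c2 []) i = true
    · have hstep : stepA c1 c2 (b0, d.insert c1 (pre ++ i :: t)) i = (b0, d.insert c1 (pre ++ i :: t)) := by
        unfold stepA
        dsimp only
        rw [hget2]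
        unfold keepB at hk
        rw [hk]
        rfl
      rw [hstep]
      have hsplit : pre ++ i :: t = (pre ++ [i]) ++ t := by simp
      rw [hsplit, ih (pre ++ [i]) b0 (by
        intro j hj
        rcases List.mem_append.1 hj with hj | hj
        · exact hpre j hj
        · simp only [List.mem_singleton] at hj; rw [hj]; exact hk)]
      simp [hk]
    · have hfalse : (d.getD c2 []).any (fun j => i != j) = false := by
        simpa [keepB] using hk
      have hnotin : i ∉ pre := fun hmem => hk (hpre i hmem)
      have hstep : stepA c1 c2 (b0, d.insert c1 (pre ++ i :: t)) i = (true, d.insert c1 (pre ++ t)) := by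
        unfold stepA
        dsimp only
        rw [hget2, hfalse, hget1]
        simp only [Bool.not_false, if_true]
        rw [remove?_append_not_mem pre t i hnotin]
        dsimp only
        rw [PySem.Dict.insert_insert_self]
      rw [hstep, ih pre true hpre]
      simp [hk]

/-- with two distinct values in `d2`, every element survives A's scan -/
theorem keepB_of_two_distinct (d2 : List String) (h : 1 < (PySem.Set.ofList d2).length) :
    ∀ i, keepB d2 i = true := by
  intro i
  obtain ⟨a, b, t, hs⟩ : ∃ a b t, PySem.Set.ofList d2 = a :: b :: t := by
    cases hS : PySem.Set.ofList d2 with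
    | nil => rw [hS] at h; simp at h
    | cons a rest =>
      cases rest with
      | nil => rw [hS] at h; simp at h
      | cons b t => exact ⟨a, b, t, rfl⟩
  have hnd := PySem.Set.nodup_ofList (xs := d2)
  rw [hs] at hnd
  have hab : a ≠ b := by
    rw [List.nodup_cons] at hnd
    exact fun e => hnd.1 (e ▸ List.mem_cons_self)
  have ha : a ∈ d2 := (PySem.Set.mem_ofList d2 a).mp (hs ▸ List.mem_cons_self)
  have hb : b ∈ d2 := (PySem.Set.mem_ofList d2 b).mp (hs ▸ List.mem_cons_of_mem _ List.mem_cons_self)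
  unfold keepB
  rw [List.any_eq_true]
  by_cases hia : i = a
  · exact ⟨b, hb, by simp [hia, hab]⟩
  · exact ⟨a, ha, by simp [hia]⟩

/-- with at most one distinct value in `d2 = v :: _`, A's scan keeps exactly the `i ≠ v` -/
theorem keepB_of_single (v : String) (t : List String)
    (h : ¬ 1 < (PySem.Set.ofList (v :: t)).length) :
    ∀ i, keepB (v :: t) i = (i != v) := by
  have hall : ∀ j ∈ v :: t, j = v := by
    intro j hj
    have hjS : j ∈ PySem.Set.ofList (v :: t) := (PySem.Set.mem_ofList _ j).mpr hj
    have hvS : v ∈ PySem.Set.ofList (v :: t) := (PySem.Set.mem_ofList _ v).mpr List.mem_cons_self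
    cases hS : PySem.Set.ofList (v :: t) with
    | nil => rw [hS] at hvS; exact absurd hvS List.not_mem_nil
    | cons a rest =>
      cases rest with
      | nil =>
        rw [hS] at hjS hvS
        simp only [List.mem_singleton] at hjS hvS
        rw [hjS, hvS]
      | cons b t2 => rw [hS] at h; simp at h
  intro i
  unfold keepB
  rw [Bool.eq_iff_iff, List.any_eq_true]
  constructor
  · rintro ⟨j, hj, hij⟩
    rw [hall j hj] at hij
    exact hij
  · intro hiv
    exact ⟨v, List.mem_cons_self, hiv⟩

theorem arc_reduce_eq_revise (x y : String) (colors : SDict)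
    (hne : x ≠ y) (hnd : colors.keys.Nodup) :
    arc_reduce x y colors = revise x y colors := by
  by_cases hc : colors.contains x = true
  · have hA : arc_reduce x y colors =
        ((colors.getD x []).any (fun i => !keepB (colors.getD y []) i),
         colors.insert x ((colors.getD x []).filter (keepB (colors.getD y [])))) := by
      have h1 := foldA_char x y (Ne.symm hne) colors (colors.getD x []) [] false (by simp)
      rw [List.nil_append, insert_getD_self colors x hnd hc] at h1
      rw [arc_reduce_eq_foldl, h1]
      simp
    unfold revise
    dsimp only
    by_cases h2 : 1 < (PySem.Set.ofList (colors.getD y [])).length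
    · rw [if_pos h2, hA]
      have hk := keepB_of_two_distinct _ h2
      have hfil : (colors.getD x []).filter (keepB (colors.getD y [])) = colors.getD x [] :=
        List.filter_eq_self.mpr (fun a _ => hk a)
      have hany : (colors.getD x []).any (fun i => !keepB (colors.getD y []) i) = false := by
        rw [List.any_eq_false]; intro a _; simp [hk a]
      rw [hfil, hany, insert_getD_self colors x hnd hc]
    · rw [if_neg h2]
      cases hdy : colors.getD y [] with
      | nil =>
        rw [hdy] at hA
        dsimp only
        have hk0 : ∀ i, keepB ([] : List String) i = false := fun i => rfl
        have hfil : (colors.getD x []).filter (keepB ([] : List String)) = [] := by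
          rw [List.filter_eq_nil_iff]; intro a _; simp [hk0 a]
        rw [hfil] at hA
        by_cases he : (colors.getD x []).isEmpty
        · rw [if_pos he]
          have honil : colors.getD x [] = [] := by simpa [List.isEmpty_iff] using he
          rw [hA, honil]
          simp
          rw [← honil, insert_getD_self colors x hnd hc]
        · rw [if_neg he]
          have hne0 : colors.getD x [] ≠ [] := by simpa [List.isEmpty_iff] using he
          rw [hA]
          have hany : (colors.getD x []).any (fun i => !keepB ([] : List String) i) = true := by
            rw [List.any_eq_true]
            obtain ⟨a, ha⟩ := List.exists_mem_of_ne_nil _ hne0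
            exact ⟨a, ha, by simp [hk0 a]⟩
          rw [hany, removeAll_self]
      | cons v t =>
        rw [hdy] at hA h2
        dsimp only
        have hk := keepB_of_single v t h2
        have hfil : (colors.getD x []).filter (keepB (v :: t))
            = (colors.getD x []).filter (fun c => c != v) :=
          List.filter_congr (fun a _ => hk a)
        rw [hfil] at hA
        by_cases he : ((colors.getD x []).filter (fun c => c == v)).isEmpty
        · rw [if_pos he]
          have hnone : ∀ a ∈ colors.getD x [], (a == v) = false := by
            intro a ha
            by_contra hcv
            have hmem : a ∈ (colors.getD x []).filter (fun c => c == v) :=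
              List.mem_filter.mpr ⟨ha, by simpa using hcv⟩
            rw [List.isEmpty_iff] at he
            rw [he] at hmem
            exact absurd hmem List.not_mem_nil
          have hfeq : (colors.getD x []).filter (fun c => c != v) = colors.getD x [] :=
            List.filter_eq_self.mpr (fun a ha => by simp [bne, hnone a ha])
          have hany : (colors.getD x []).any (fun i => !keepB (v :: t) i) = false := by
            rw [List.any_eq_false]
            intro a ha
            simp [hk a, bne, hnone a ha]
          rw [hA, hany, hfeq, insert_getD_self colors x hnd hc]
        · rw [if_neg he]
          rw [hA]
          have hex : ∃ a ∈ colors.getD x [], (a == v) = true := by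
            have hne' : (colors.getD x []).filter (fun c => c == v) ≠ [] := by
              simpa [List.isEmpty_iff] using he
            obtain ⟨a, ha⟩ := List.exists_mem_of_ne_nil _ hne'
            rw [List.mem_filter] at ha
            exact ⟨a, ha.1, ha.2⟩
          have hany : (colors.getD x []).any (fun i => !keepB (v :: t) i) = true := by
            rw [List.any_eq_true]
            obtain ⟨a, ha, hav⟩ := hex
            exact ⟨a, ha, by simp [hk a, bne, hav]⟩
          rw [hany, removeAll_filter (fun c => c == v) (colors.getD x [])]
          have hsame : (colors.getD x []).filter (fun c => !(c == v))
              = (colors.getD x []).filter (fun c => c != v) :=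
            List.filter_congr (fun a _ => by simp [bne])
          rw [hsame]
  · -- x not a key: both sides are (false, colors)
    have hg : colors.getD x [] = [] :=
      PySem.Dict.getD_of_not_contains colors [] (by simpa using hc)
    rw [arc_reduce_eq_foldl, hg, List.foldl_nil]
    unfold revise
    dsimp only
    split
    · rfl
    · rw [hg]
      cases colors.getD y [] <;> simp

-- ---- the two queue constructions build the same list ----

def condQ (nb : SDict) (x y : String) : Bool :=
  (nb.getD y []).contains x || (nb.getD x []).contains y

def blockQ (nb : SDict) (u : List String) (x : String) : List (String × String) :=
  (u.filter (fun y => x != y && condQ nb x y)).map (fun y => (x, y))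

theorem mem_blockQ (nb : SDict) (u : List String) (x : String) (p : String × String) :
    p ∈ blockQ nb u x ↔ p.1 = x ∧ p.2 ∈ u ∧ x ≠ p.2 ∧ condQ nb x p.2 = true := by
  obtain ⟨a, b⟩ := p
  simp only [blockQ, List.mem_map, List.mem_filter, Bool.and_eq_true, bne_iff_ne, Prod.mk.injEq]
  constructor
  · rintro ⟨y, ⟨hyu, hxy, hc⟩, hax, hby⟩
    exact ⟨hax.symm, hby ▸ hyu, hby ▸ hxy, hby ▸ hc⟩
  · rintro ⟨hax, hbu, hxb, hc⟩
    exact ⟨b, ⟨hbu, hxb, hc⟩, hax.symm, rfl⟩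

theorem filterMap_if_map {α β : Type} (p : α → Bool) (f : α → β) (l : List α) :
    l.filterMap (fun y => if p y then some (f y) else none) = (l.filter p).map f := by
  induction l with
  | nil => rfl
  | cons a t ih =>
    cases h : p a with
    | true => simp [h, ih]
    | false => simp [h, ih]

/-- the filterMap comprehension of B is the filter-then-map `blockQ` -/
theorem filterMap_if_eq_blockQ (nb : SDict) (u : List String) (x : String) :
    u.filterMap (fun y => if x != y && ((nb.getD y []).contains x || (nb.getD x []).contains y)
      then some (x, y) else none) = blockQ nb u x :=
  filterMap_if_map (fun y => x != y && condQ nb x y) (fun y => (x, y)) u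

def innerStep (nb : SDict) (x : String) (q : List (String × String)) (y : String) :
    List (String × String) :=
  if x = y then q
  else if (x, y) ∈ q then q
  else if (nb.getD y []).contains x || (nb.getD x []).contains y then q ++ [(x, y)]
  else q

theorem foldl_fixed {α β : Type} (f : β → α → β) (q : β) (l : List α)
    (h : ∀ y ∈ l, f q y = q) : l.foldl f q = q := by
  induction l with
  | nil => rfl
  | cons a t ih =>
    rw [List.foldl_cons, h a (List.mem_cons_self)]
    exact ih (fun y hy => h y (List.mem_cons_of_mem _ hy))

theorem blockQ_add_self (nb : SDict) (seen : PySem.Set String) (x : String) :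
    blockQ nb (PySem.Set.add seen x) x = blockQ nb seen x := by
  show blockQ nb (if seen.contains x then seen else seen ++ [x]) x = blockQ nb seen x
  split
  · rfl
  · simp [blockQ, List.filter_append]

theorem blockQ_add_of_cond_false (nb : SDict) (seen : PySem.Set String) (x y : String)
    (h : condQ nb x y = false) :
    blockQ nb (PySem.Set.add seen y) x = blockQ nb seen x := by
  show blockQ nb (if seen.contains y then seen else seen ++ [y]) x = blockQ nb seen x
  split
  · rfl
  · simp [blockQ, List.filter_append, h]

theorem innerA (nb : SDict) (x : String) (q0 : List (String × String))
    (hq0 : ∀ p ∈ q0, p.1 ≠ x) :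
    ∀ (l : List String) (seen : PySem.Set String),
      l.foldl (innerStep nb x) (q0 ++ blockQ nb seen x)
        = q0 ++ blockQ nb (PySem.Set.update seen l) x := by
  intro l
  induction l with
  | nil => intro seen; rfl
  | cons y t ih =>
    intro seen
    rw [List.foldl_cons]
    have hupd : PySem.Set.update seen (y :: t) = PySem.Set.update (PySem.Set.add seen y) t := rfl
    rw [hupd]
    by_cases hxy : x = y
    · have hstep : innerStep nb x (q0 ++ blockQ nb seen x) y = q0 ++ blockQ nb seen x := by
        unfold innerStep; rw [if_pos hxy]
      rw [hstep, ← blockQ_add_self nb seen x]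
      have hbx : blockQ nb (PySem.Set.add seen x) x = blockQ nb (PySem.Set.add seen y) x := by
        rw [hxy]
      rw [hbx]
      exact ih (PySem.Set.add seen y)
    · have hmemq0 : (x, y) ∉ q0 := fun h => hq0 _ h rfl
      have hmemiff : (x, y) ∈ q0 ++ blockQ nb seen x ↔ (y ∈ seen ∧ condQ nb x y = true) := by
        rw [List.mem_append]
        constructor
        · rintro (h | h)
          · exact absurd h hmemq0
          · rw [mem_blockQ] at h; exact ⟨h.2.1, h.2.2.2⟩
        · rintro ⟨h1, h2⟩
          exact Or.inr ((mem_blockQ nb seen x (x, y)).mpr ⟨rfl, h1, hxy, h2⟩)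
      by_cases hmem : (x, y) ∈ q0 ++ blockQ nb seen x
      · have hstep : innerStep nb x (q0 ++ blockQ nb seen x) y = q0 ++ blockQ nb seen x := by
          unfold innerStep; rw [if_neg hxy, if_pos hmem]
        rw [hstep]
        have hyseen : y ∈ seen := (hmemiff.mp hmem).1
        have hadd : PySem.Set.add seen y = seen := by
          show (if seen.contains y then seen else seen ++ [y]) = seen
          rw [if_pos (by simp [PySem.Set.contains, hyseen])]
        rw [hadd]
        exact ih seen
      · by_cases hcond : condQ nb x y = true
        · have hynot : y ∉ seen := fun hy => hmem (hmemiff.mpr ⟨hy, hcond⟩)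
          have hstep : innerStep nb x (q0 ++ blockQ nb seen x) y
              = (q0 ++ blockQ nb seen x) ++ [(x, y)] := by
            unfold innerStep
            rw [if_neg hxy, if_neg hmem, if_pos (by exact hcond)]
          rw [hstep]
          have hadd : PySem.Set.add seen y = seen ++ [y] := by
            show (if seen.contains y then seen else seen ++ [y]) = seen ++ [y]
            rw [if_neg (by simp [PySem.Set.contains, hynot])]
          have hblk : blockQ nb (PySem.Set.add seen y) x = blockQ nb seen x ++ [(x, y)] := by
            rw [hadd]
            simp [blockQ, List.filter_append, hxy, hcond]
          have : (q0 ++ blockQ nb seen x) ++ [(x, y)] = q0 ++ blockQ nb (PySem.Set.add seen y) x := by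
            rw [hblk, List.append_assoc]
          rw [this]
          exact ih (PySem.Set.add seen y)
        · have hstep : innerStep nb x (q0 ++ blockQ nb seen x) y = q0 ++ blockQ nb seen x := by
            unfold innerStep
            rw [if_neg hxy, if_neg hmem, if_neg (show ¬ ((PySem.Dict.getD nb y []).contains x || (PySem.Dict.getD nb x []).contains y) = true from hcond)]
          rw [hstep, ← blockQ_add_of_cond_false nb seen x y (eq_false_of_ne_true hcond)]
          exact ih (PySem.Set.add seen y)

theorem outerA (nb : SDict) (countries : List String) :
    ∀ (l : List String) (seen : PySem.Set String),
      l.foldl (fun q x => countries.foldl (innerStep nb x) q)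
          (seen.flatMap (blockQ nb (PySem.Set.ofList countries)))
        = (PySem.Set.update seen l).flatMap (blockQ nb (PySem.Set.ofList countries)) := by
  intro l
  induction l with
  | nil => intro seen; rfl
  | cons x t ih =>
    intro seen
    rw [List.foldl_cons]
    have hupd : PySem.Set.update seen (x :: t) = PySem.Set.update (PySem.Set.add seen x) t := rfl
    rw [hupd]
    by_cases hx : x ∈ seen
    · have hadd : PySem.Set.add seen x = seen := by
        show (if seen.contains x then seen else seen ++ [x]) = seen
        rw [if_pos (by simp [PySem.Set.contains, hx])]
      have hfix : countries.foldl (innerStep nb x)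
          (seen.flatMap (blockQ nb (PySem.Set.ofList countries)))
          = seen.flatMap (blockQ nb (PySem.Set.ofList countries)) := by
        apply foldl_fixed
        intro y hy
        unfold innerStep
        by_cases hxy : x = y
        · rw [if_pos hxy]
        · rw [if_neg hxy]
          by_cases hmem : (x, y) ∈ seen.flatMap (blockQ nb (PySem.Set.ofList countries))
          · rw [if_pos hmem]
          · rw [if_neg hmem]
            by_cases hcb : ((nb.getD y []).contains x || (nb.getD x []).contains y) = true
            · exact absurd (List.mem_flatMap.mpr ⟨x, hx, (mem_blockQ _ _ _ _).mpr
                ⟨rfl, (PySem.Set.mem_ofList countries y).mpr hy, hxy,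
                 show condQ nb x y = true from hcb⟩⟩) hmem
            · rw [if_neg hcb]
      rw [hfix, hadd]
      exact ih seen
    · have hq0 : ∀ p ∈ seen.flatMap (blockQ nb (PySem.Set.ofList countries)), p.1 ≠ x := by
        intro p hp
        rw [List.mem_flatMap] at hp
        obtain ⟨x', hx', hpb⟩ := hp
        rw [mem_blockQ] at hpb
        rw [hpb.1]
        exact fun e => hx (e ▸ hx')
      have hstart : seen.flatMap (blockQ nb (PySem.Set.ofList countries))
          = seen.flatMap (blockQ nb (PySem.Set.ofList countries)) ++ blockQ nb PySem.Set.empty x := by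
        simp [blockQ, PySem.Set.empty]
      have hinner := innerA nb x _ hq0 countries PySem.Set.empty
      rw [hstart, hinner]
      have hofl : PySem.Set.update PySem.Set.empty countries = PySem.Set.ofList countries := rfl
      rw [hofl]
      have hadd : PySem.Set.add seen x = seen ++ [x] := by
        show (if seen.contains x then seen else seen ++ [x]) = seen ++ [x]
        rw [if_neg (by simp [PySem.Set.contains, hx])]
      have hflat : seen.flatMap (blockQ nb (PySem.Set.ofList countries))
            ++ blockQ nb (PySem.Set.ofList countries) x
          = (PySem.Set.add seen x).flatMap (blockQ nb (PySem.Set.ofList countries)) := by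
        rw [hadd, List.flatMap_append]
        simp
      rw [hflat]
      exact ih (PySem.Set.add seen x)

theorem queueA_eq (nb : SDict) (countries : List String) :
    countries.foldl (fun q x =>
      countries.foldl (fun q y =>
        if x = y then q
        else if (x, y) ∈ q then q
        else if (nb.getD y []).contains x || (nb.getD x []).contains y then q ++ [(x, y)]
        else q) q) ([] : List (String × String))
    = (PySem.Set.ofList countries).flatMap (blockQ nb (PySem.Set.ofList countries)) := by
  have h := outerA nb countries countries PySem.Set.empty
  show countries.foldl (fun q x => countries.foldl (innerStep nb x) q) ([] : List (String × String)) = _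
  simpa using h

/-- B's new-arc comprehension is A's filter-then-map append block -/
theorem newArcs_eq (nb : SDict) (x y : String) :
    newArcs nb x y
      = ((nb.getD x []).filter (fun z => z != x && z != y)).map (fun z => (x, z)) := by
  unfold newArcs
  exact filterMap_if_map (fun z => z != x && z != y) (fun z => (x, z)) (nb.getD x [])

-- ---- the worklist loop and the consuming loop agree ----
theorem loopA_congr (nb : SDict) (q : List (String × String)) (i : Nat) {c1 c2 : SDict}
    (h : c1 = c2) (h1 : c1.keys.Nodup) (h2 : c2.keys.Nodup) :
    loopA nb q i c1 h1 = loopA nb q i c2 h2 := by cases h; rfl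

theorem loopB_congr (nb : SDict) (q : List (String × String)) {c1 c2 : SDict}
    (h : c1 = c2) (h1 : c1.keys.Nodup) (h2 : c2.keys.Nodup) :
    loopB nb q c1 h1 = loopB nb q c2 h2 := by cases h; rfl

theorem loop_eq (nb : SDict) :
    ∀ (N k : Nat) (colors : SDict) (queue : List (String × String)) (index : Nat)
      (hnd : colors.keys.Nodup),
      totalSize colors < N → queue.length - index < k → index ≤ queue.length →
      (∀ p ∈ queue.drop index, p.1 ≠ p.2) →
      loopA nb queue index colors hnd = loopB nb (queue.drop index) colors hnd := by
  intro N
  induction N with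
  | zero => intro k colors queue index hnd hN; omega
  | succ N ihN =>
    intro k
    induction k with
    | zero => intro colors queue index hnd hN hk; omega
    | succ k ihk =>
      intro colors queue index hnd hN hk hle harc
      by_cases h : index < queue.length
      · have hdrop : queue.drop index = queue[index] :: queue.drop (index + 1) :=
          List.drop_eq_getElem_cons h
        have hne : queue[index].1 ≠ queue[index].2 :=
          harc queue[index] (by rw [hdrop]; exact List.mem_cons_self)
        have harc1 : ∀ p ∈ queue.drop (index + 1), p.1 ≠ p.2 := by
          intro p hpm
          exact harc p (by rw [hdrop]; exact List.mem_cons_of_mem _ hpm)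
        have req := arc_reduce_eq_revise queue[index].1 queue[index].2 colors hne hnd
        rw [loopA, dif_pos h, hdrop, loopB]
        dsimp only
        by_cases hb : (arc_reduce queue[index].1 queue[index].2 colors).1 = true
        · have hb' : (revise queue[index].1 queue[index].2 colors).1 = true := by
            rw [← req]; exact hb
          rw [dif_pos hb, dif_pos hb']
          have h2eq : (revise queue[index].1 queue[index].2 colors).2
              = (arc_reduce queue[index].1 queue[index].2 colors).2 := by rw [req]
          have hszlt : totalSize (arc_reduce queue[index].1 queue[index].2 colors).2 < totalSize colors :=
            (arc_reduce_props queue[index].1 queue[index].2 colors hnd).2.2 hb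
          by_cases hz : ((arc_reduce queue[index].1 queue[index].2 colors).2.getD queue[index].1 []).length = 0
          · rw [if_pos hz, if_pos (by rw [h2eq, ← List.length_eq_zero_iff]; exact hz)]
          · rw [if_neg hz, if_neg (by rw [h2eq, ← List.length_eq_zero_iff]; exact hz)]
            set nw := ((nb.getD queue[index].1 []).filter
              (fun z => z != queue[index].1 && z != queue[index].2)).map
              (fun z => (queue[index].1, z)) with hnw
            have hdropapp : (queue ++ nw).drop (index + 1) = queue.drop (index + 1) ++ nw :=
              List.drop_append_of_le_length (by omega)
            have harcnew : ∀ p ∈ (queue ++ nw).drop (index + 1), p.1 ≠ p.2 := by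
              intro p hpm
              rw [hdropapp, List.mem_append] at hpm
              rcases hpm with hpm | hpm
              · exact harc1 p hpm
              · rw [hnw, List.mem_map] at hpm
                obtain ⟨z, hz2, hpz⟩ := hpm
                rw [List.mem_filter] at hz2
                have hzx : z ≠ queue[index].1 := by
                  have := hz2.2
                  simp only [Bool.and_eq_true, bne_iff_ne] at this
                  exact this.1
                rw [← hpz]
                exact fun e => hzx e.symm
            have ihapp := ihN ((queue ++ nw).length - index) (arc_reduce queue[index].1 queue[index].2 colors).2
              (queue ++ nw) (index + 1) ((arc_reduce_props queue[index].1 queue[index].2 colors hnd).1)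
              (by omega) (by simp; omega) (by simp; omega) harcnew
            rw [ihapp, hdropapp, newArcs_eq, ← hnw]
            exact loopB_congr nb _ h2eq.symm _ _
        · have hb' : ¬ (revise queue[index].1 queue[index].2 colors).1 = true := by
            rw [← req]; exact hb
          rw [dif_neg hb, dif_neg hb']
          have hfeq : (arc_reduce queue[index].1 queue[index].2 colors).2 = colors :=
            (arc_reduce_props queue[index].1 queue[index].2 colors hnd).2.1 (by simpa using hb)
          rw [loopA_congr nb queue (index + 1) hfeq _ hnd]
          exact ihk colors queue (index + 1) hnd hN (by omega) (by omega) harc1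
      · rw [loopA, dif_neg h]
        have hdnil : queue.drop index = [] := List.drop_eq_nil_of_le (by omega)
        rw [hdnil, loopB]

-- ---- assembling the verdict ----

theorem arc_cons_eq_alt_unconditional (countries : List String)
    (colors : List (String × List String)) (neighbours : List (String × List String)) :
    arc_cons countries colors neighbours = arc_cons_alt countries colors neighbours := by
  unfold arc_cons arc_cons_alt
  dsimp only
  rw [queueA_eq (PySem.Dict.ofList neighbours) countries]
  have hq : (PySem.Set.ofList countries).flatMap (fun x =>
        (PySem.Set.ofList countries).filterMap (fun y =>
          if x != y && (((PySem.Dict.ofList neighbours : SDict).getD y []).contains x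
              || ((PySem.Dict.ofList neighbours : SDict).getD x []).contains y)
          then some (x, y) else none))
      = (PySem.Set.ofList countries).flatMap
          (blockQ (PySem.Dict.ofList neighbours) (PySem.Set.ofList countries)) := by
    apply List.flatMap_congr  -- may not exist; fallback below
    intro x _
    exact filterMap_if_eq_blockQ (PySem.Dict.ofList neighbours) (PySem.Set.ofList countries) x
  rw [hq]
  have harc : ∀ p ∈ (PySem.Set.ofList countries).flatMap
      (blockQ (PySem.Dict.ofList neighbours) (PySem.Set.ofList countries)), p.1 ≠ p.2 := by
    intro p hp
    rw [List.mem_flatMap] at hp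
    obtain ⟨x', hx', hpb⟩ := hp
    rw [mem_blockQ] at hpb
    rw [hpb.1]
    exact hpb.2.2.1
  have h := loop_eq (PySem.Dict.ofList neighbours)
    (totalSize (PySem.Dict.ofList colors) + 1)
    ((PySem.Set.ofList countries).flatMap
      (blockQ (PySem.Dict.ofList neighbours) (PySem.Set.ofList countries))).length.succ
    (PySem.Dict.ofList colors)
    ((PySem.Set.ofList countries).flatMap
      (blockQ (PySem.Dict.ofList neighbours) (PySem.Set.ofList countries)))
    0 (PySem.Dict.nodup_keys_ofList colors) (by omega) (by omega) (by omega)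
    (by simpa using harc)
  rw [List.drop_zero] at h
  rw [h]

-- ===== VERDICT (by name: the statement is the Claim_ definition above) =====
theorem arc_cons_spec : Claim_equal_arc_cons := by
  intro countries colors neighbours _ _
  exact arc_cons_eq_alt_unconditional countries colors neighbours
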